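-- pv_equiv track=rewrite | github.com/rahul38888/coding_practice | src/practices/practice/min_index_char/script.py | minIndexChar
-- ===== SOURCE A (Python) =====
-- def minIndexChar(str, pat):
--     pat_h = set()
--     for p in pat:
--         pat_h.add(p)
--
--     for i in range(len(str)):
--         if pat_h.__contains__(str[i]):
--             return i
--
--     return -1
-- ===== SOURCE B (Python) =====
-- def minIndexChar(str, pat):
--     hits = [i for i in (str.find(c) for c in pat) if i >= 0]
--     return min(hits) if hits else -1
-- ===== Notes on version B (the rewrite author's own statement) =====
-- stated objective: alternative
-- what changed: Instead of building a set of pattern chars and scanning the string with a membership test, B searches the string once per pattern character via str.find and returns the minimum of the non-negative hit indices (-1 if none).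
import Mathlib
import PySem

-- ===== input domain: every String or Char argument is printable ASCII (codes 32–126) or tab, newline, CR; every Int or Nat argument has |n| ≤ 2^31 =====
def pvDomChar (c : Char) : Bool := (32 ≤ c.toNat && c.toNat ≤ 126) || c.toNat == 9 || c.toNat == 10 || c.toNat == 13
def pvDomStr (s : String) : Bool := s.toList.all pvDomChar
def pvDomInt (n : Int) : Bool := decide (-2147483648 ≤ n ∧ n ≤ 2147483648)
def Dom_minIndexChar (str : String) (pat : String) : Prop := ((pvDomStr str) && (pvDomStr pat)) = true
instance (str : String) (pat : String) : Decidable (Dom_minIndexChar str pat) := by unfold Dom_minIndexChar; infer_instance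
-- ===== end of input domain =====

-- B replaces A's set-membership scan of the string by one str.find per pattern character,
-- returning the minimum non-negative hit (objective: alternative decomposition, similar cost).

-- ===== PORT A =====
-- the 'for i in range(len(str)): if pat_h.__contains__(str[i]): return i' loop, index carried along
def minIndexCharGo (pat_h : PySem.Set Char) (i : Int) : List Char → Int
  | [] => -1
  | c :: rest => if PySem.Set.contains pat_h c then i else minIndexCharGo pat_h (i + 1) rest

def minIndexChar (str : String) (pat : String) : Int :=
  let pat_h := pat.toList.foldl (fun h p => PySem.Set.add h p) PySem.Set.empty
  minIndexCharGo pat_h 0 str.toList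

-- ===== PORT B =====
def minIndexChar_alt (str : String) (pat : String) : Int :=
  let hits := (pat.toList.map (fun c => PySem.Str.find str (String.ofList [c]))).filter
      (fun i => decide (0 ≤ i))
  match PySem.List.min? hits (fun x => x) with
  | some m => m
  | none => -1

-- ===== PRECONDITION & SPEC =====
def Spec_minIndexChar (str : String) (pat : String) (out : Int) : Prop := out = minIndexChar_alt str pat
instance (str : String) (pat : String) (out : Int) : Decidable (Spec_minIndexChar str pat out) := by unfold Spec_minIndexChar; infer_instance

-- ===== CLAIM (what is proved, stated in full; the proofs are below) =====
def Claim_equal_minIndexChar : Prop := ∀ (str : String) (pat : String), Dom_minIndexChar str pat → Spec_minIndexChar str pat (minIndexChar str pat)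

-- ===== LEMMAS AND PROOFS =====

lemma singleton_prefix_iff (c : Char) (t : List Char) : [c] <+: t ↔ t.head? = some c := by
  cases t with
  | nil => simp
  | cons a t =>
    simp only [List.cons_prefix_cons, List.nil_prefix, and_true, List.head?_cons,
      Option.some.injEq]
    exact eq_comm

lemma singleton_prefix_drop (c : Char) (s : List Char) (n : Nat) :
    [c] <+: s.drop n ↔ s[n]? = some c := by
  rw [singleton_prefix_iff, List.head?_drop]

lemma singleton_infix_iff (c : Char) (s : List Char) : [c] <:+: s ↔ c ∈ s := by
  constructor
  · intro h; simpa using List.singleton_sublist.mp h.sublist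
  · intro h
    obtain ⟨l1, l2, rfl⟩ := List.append_of_mem h
    exact ⟨l1, l2, by simp⟩

lemma find_single_nonneg {s : List Char} {c : Char} (h : c ∈ s) :
    0 ≤ PySem.Chars.find s [c] :=
  (PySem.Chars.find_nonneg_iff s [c]).mpr ((singleton_infix_iff c s).mpr h)

lemma find_single_at {s : List Char} {c : Char} (h0 : 0 ≤ PySem.Chars.find s [c]) :
    s[(PySem.Chars.find s [c]).toNat]? = some c :=
  (singleton_prefix_drop c s _).mp (PySem.Chars.find_spec h0).1

lemma find_single_le {s : List Char} {c : Char} {j : Nat} (hj : s[j]? = some c) :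
    PySem.Chars.find s [c] ≤ (j : Int) := by
  have hmem : c ∈ s := by
    obtain ⟨hlt, heq⟩ := List.getElem?_eq_some_iff.mp hj
    exact heq ▸ List.getElem_mem hlt
  have h0 := find_single_nonneg hmem
  obtain ⟨-, hmin⟩ := PySem.Chars.find_spec h0
  by_contra hlt
  push_neg at hlt
  have htn := Int.toNat_of_nonneg h0
  exact hmin j (by omega) ((singleton_prefix_drop c s j).mpr hj)

lemma findIdx?_some_spec {α : Type} (p : α → Bool) :
    ∀ (l : List α) (j : Nat), l.findIdx? p = some j →
      ∃ c, l[j]? = some c ∧ p c = true ∧ ∀ k < j, ∀ x, l[k]? = some x → p x = false := by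
  intro l
  induction l with
  | nil => intro j h; simp at h
  | cons a t ih =>
    intro j h
    rw [List.findIdx?_cons] at h
    by_cases hpa : p a = true
    · simp [hpa] at h
      subst h
      exact ⟨a, by simp, hpa, by intro k hk; omega⟩
    · simp only [hpa, if_false, Bool.false_eq_true] at h
      cases hft : List.findIdx? p t with
      | none => rw [hft] at h; simp at h
      | some j' =>
        rw [hft] at h
        simp only [Option.map_some, Option.some.injEq] at h
        subst h
        obtain ⟨c, hc1, hc2, hc3⟩ := ih j' hft
        refine ⟨c, by simpa using hc1, hc2, ?_⟩
        intro k hk x hx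
        cases k with
        | zero =>
          simp only [List.getElem?_cons_zero, Option.some.injEq] at hx
          subst hx
          simpa using hpa
        | succ k' =>
          exact hc3 k' (by omega) x (by simpa using hx)

lemma contains_ofList (p : List Char) (c : Char) :
    PySem.Set.contains (PySem.Set.ofList p) c = decide (c ∈ p) := by
  simp [PySem.Set.contains, PySem.Set.mem_ofList]

lemma go_eq (h : PySem.Set Char) (s : List Char) (i : Int) :
    minIndexCharGo h i s =
      match List.findIdx? (fun c => PySem.Set.contains h c) s with
      | some j => i + (j : Int)
      | none => -1 := by
  induction s generalizing i with
  | nil => simp [minIndexCharGo]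
  | cons a t ih =>
    rw [minIndexCharGo, List.findIdx?_cons]
    cases hc : PySem.Set.contains h a with
    | true =>
      simp only [hc, if_true]
      simp
    | false =>
      simp only [hc, Bool.false_eq_true, if_false]
      rw [ih (i + 1)]
      cases hft : List.findIdx? (fun c => PySem.Set.contains h c) t with
      | none => simp
      | some j =>
        simp only [Option.map_some]
        push_cast
        ring

lemma main_eq (s p : List Char) :
    minIndexCharGo (PySem.Set.ofList p) 0 s =
      (match PySem.List.min?
          ((p.map (fun c => PySem.Chars.find s [c])).filter (fun i => decide (0 ≤ i)))
          (fun x => x) with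
      | some m => m
      | none => -1) := by
  rw [go_eq]
  cases hfd : List.findIdx? (fun c => PySem.Set.contains (PySem.Set.ofList p) c) s with
  | none =>
    have hall : ∀ x ∈ s, x ∉ p := by
      intro x hx
      have := List.findIdx?_eq_none_iff.mp hfd x hx
      simpa [contains_ofList] using this
    have hnil :
        (p.map (fun c => PySem.Chars.find s [c])).filter (fun i => decide (0 ≤ i)) = [] := by
      rw [List.filter_eq_nil_iff]
      intro a ha
      obtain ⟨c, hcp, rfl⟩ := List.mem_map.mp ha
      simp only [decide_eq_true_eq]
      intro h0
      have hmem : c ∈ s := by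
        have := find_single_at h0
        obtain ⟨hlt, heq⟩ := List.getElem?_eq_some_iff.mp this
        exact heq ▸ List.getElem_mem hlt
      exact hall c hmem hcp
    rw [hnil]
    simp [PySem.List.min?]
  | some j =>
    obtain ⟨c0, hget, hc0, hmin⟩ :=
      findIdx?_some_spec (fun c => PySem.Set.contains (PySem.Set.ofList p) c) s j hfd
    have hc0p : c0 ∈ p := by simpa [contains_ofList] using hc0
    have hc0s : c0 ∈ s := by
      obtain ⟨hlt, heq⟩ := List.getElem?_eq_some_iff.mp hget
      exact heq ▸ List.getElem_mem hlt
    have hf0 : 0 ≤ PySem.Chars.find s [c0] := find_single_nonneg hc0s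
    have hfle : PySem.Chars.find s [c0] ≤ (j : Int) := find_single_le hget
    have hhit : PySem.Chars.find s [c0] ∈
        (p.map (fun c => PySem.Chars.find s [c])).filter (fun i => decide (0 ≤ i)) := by
      rw [List.mem_filter]
      exact ⟨List.mem_map.mpr ⟨c0, hc0p, rfl⟩, by simpa using hf0⟩
    cases hm : PySem.List.min?
        ((p.map (fun c => PySem.Chars.find s [c])).filter (fun i => decide (0 ≤ i)))
        (fun x => x) with
    | none =>
      exfalso
      have := (PySem.List.min?_eq_none_iff _ _).mp hm
      rw [this] at hhit
      simp at hhit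
    | some m =>
      have hmmem := PySem.List.min?_mem hm
      rw [List.mem_filter] at hmmem
      obtain ⟨hmap, hm0⟩ := hmmem
      obtain ⟨c', hc'p, hc'eq⟩ := List.mem_map.mp hmap
      have hm0' : 0 ≤ m := by simpa using hm0
      have hle1 : m ≤ (j : Int) :=
        le_trans (PySem.List.min?_isMin hm _ hhit) hfle
      have hle2 : (j : Int) ≤ m := by
        have hfind0 : 0 ≤ PySem.Chars.find s [c'] := hc'eq ▸ hm0'
        have hat := find_single_at hfind0
        by_contra hlt
        push_neg at hlt
        have htn := Int.toNat_of_nonneg hfind0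
        have hklt : (PySem.Chars.find s [c']).toNat < j := by
          rw [hc'eq] at htn ⊢
          omega
        have := hmin _ hklt c' hat
        simp [contains_ofList] at this
        exact this hc'p
      have : m = (j : Int) := le_antisymm hle1 hle2
      simp [this]

-- ===== VERDICT (by name: the statement is the Claim_ definition above) =====
theorem minIndexChar_spec : Claim_equal_minIndexChar := by
  intro str pat _
  unfold Spec_minIndexChar minIndexChar minIndexChar_alt
  have hset : pat.toList.foldl (fun h p => PySem.Set.add h p) PySem.Set.empty =
      PySem.Set.ofList pat.toList := (PySem.Set.ofList_eq_foldl pat.toList).symm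
  simp only [hset, PySem.Str.find_eq, String.toList_ofList]
  exact main_eq str.toList pat.toList
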